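-- pv_equiv track=rewrite | github.com/SethPalmer3/CS472_HW2 | id3.py | collect_counts
-- ===== SOURCE A (Python) =====
-- def collect_counts(data: list[list], varnames: list[str])->dict[str, dict]:
--     """Creates a dictionary of dictionaries for which each entry describes the attributes values and how many there are
--
--     Parameters
--     ----------
--     data : list
--         A 2D list of data values where the columns consist of values for a given attribute
--     varnames : list[str]
--         A list of all the attribute names that are associated with the data
--
--     Returns
--     -------
--     dict
--         where each entry describes the attribute and the value is another dict with it's values and how many there are
--     """
--     var_counts = {}
--     for v in range(len(varnames)):
--         var = {} # stores collection info for a particular attribute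
--         for c in range(len(data)):
--             if var.get(data[c][v]) is None: # Not already stored value
--                 var[data[c][v]] = 0
--             var[data[c][v]] += 1
--         var_counts[varnames[v]] = var
--
--     return var_counts
-- ===== SOURCE B (Python) =====
-- def collect_counts(data: list[list], varnames: list[str]) -> dict[str, dict]:
--     """Per attribute: extract its column, dedup it to first-occurrence order,
--     then count each distinct value with list.count (staged dedup+count instead
--     of an incrementally maintained count dict)."""
--     def column_counts(col):
--         return {x: col.count(x) for x in dict.fromkeys(col)}
--     return {name: column_counts([row[v] for row in data])
--             for v, name in enumerate(varnames)}
-- ===== Notes on version B (the rewrite author's own statement) =====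
-- stated objective: simpler
-- what changed: Replaced A's incremental counting (a dict maintained with a guarded get/init/+=1 per row) by a staged per-column computation: extract the column, deduplicate it to first-occurrence order with dict.fromkeys, and obtain each distinct value's count with list.count; the result is assembled by dict comprehensions. Pre_ excludes only ragged inputs with a row shorter than varnames, on which A raises IndexError.
import Mathlib
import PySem

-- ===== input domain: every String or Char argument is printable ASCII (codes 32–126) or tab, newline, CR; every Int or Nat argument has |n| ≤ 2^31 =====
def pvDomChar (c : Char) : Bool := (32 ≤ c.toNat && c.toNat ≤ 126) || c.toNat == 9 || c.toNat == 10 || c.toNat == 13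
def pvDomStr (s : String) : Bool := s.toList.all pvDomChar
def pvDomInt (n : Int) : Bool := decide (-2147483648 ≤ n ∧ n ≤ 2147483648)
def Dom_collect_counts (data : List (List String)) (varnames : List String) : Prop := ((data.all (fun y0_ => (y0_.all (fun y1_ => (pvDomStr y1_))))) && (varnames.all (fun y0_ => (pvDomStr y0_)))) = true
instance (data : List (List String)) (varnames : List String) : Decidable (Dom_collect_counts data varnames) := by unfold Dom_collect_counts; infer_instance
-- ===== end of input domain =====

-- B replaces A's incremental count dict by a staged per-column pass: dedup the column
-- to first-occurrence order, then count each distinct value (objective: simpler, same result).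

-- ===== PORT A =====
def collect_counts (data : List (List String)) (varnames : List String) : List (String × List (String × Int)) :=
  let var_counts : PySem.Dict String (PySem.Dict String Int) :=
    (PySem.List.pyRange 0 (PySem.List.len varnames) 1).foldl (fun var_counts v =>
      let var : PySem.Dict String Int :=
        (PySem.List.pyRange 0 (PySem.List.len data) 1).foldl (fun var c =>
          -- data[c][v]: c is always in range; v is in range for every row under Pre_ (the "" default is never read inside Pre_)
          let x := PySem.List.pyGetD (PySem.List.pyGetD data c []) v ""
          let var := if var.get? x = none then var.insert x 0 else var
          var.insert x (var.getD x 0 + 1)) PySem.Dict.empty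
      var_counts.insert (PySem.List.pyGetD varnames v "") var) PySem.Dict.empty
  var_counts.items.map (fun p => (p.1, p.2.items))

-- ===== PORT B =====
-- {x: col.count(x) for x in dict.fromkeys(col)}
def pvColumnCounts (col : List String) : PySem.Dict String Int :=
  PySem.Dict.ofList ((PySem.List.dedup col).map (fun x => (x, (col.count x : Int))))

def collect_counts_alt (data : List (List String)) (varnames : List String) : List (String × List (String × Int)) :=
  (PySem.Dict.ofList ((PySem.List.enumerate varnames 0).map (fun p =>
      -- row[p.1]: in range under Pre_
      (p.2, pvColumnCounts (data.map (fun row => PySem.List.pyGetD row p.1 "")))))).items.map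
    (fun q => (q.1, q.2.items))

-- ===== PRECONDITION & SPEC =====
-- Pre_ excludes exactly the ragged inputs with a row shorter than varnames, on which A (and B)
-- raise IndexError at data[c][v] / row[v].
def Pre_collect_counts (data : List (List String)) (varnames : List String) : Prop :=
  ∀ row ∈ data, varnames.length ≤ row.length
instance (data : List (List String)) (varnames : List String) : Decidable (Pre_collect_counts data varnames) := by unfold Pre_collect_counts; infer_instance

def pvWitness_collect_counts : List (List String) × List String :=
  ([["a", "b"], ["c", "b"]], ["x", "y"])

def Spec_collect_counts (data : List (List String)) (varnames : List String) (out : List (String × List (String × Int))) : Prop := out = collect_counts_alt data varnames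
instance (data : List (List String)) (varnames : List String) (out : List (String × List (String × Int))) : Decidable (Spec_collect_counts data varnames out) := by unfold Spec_collect_counts; infer_instance

-- ===== CLAIM (what is proved, stated in full; the proofs are below) =====
def Claim_equal_collect_counts : Prop := ∀ (data : List (List String)) (varnames : List String), Dom_collect_counts data varnames → Pre_collect_counts data varnames → Spec_collect_counts data varnames (collect_counts data varnames)

-- ===== LEMMAS AND PROOFS =====

/-- One counting step: `d[x] = d.get(x, 0) + 1`. -/
def pvBump (d : PySem.Dict String Int) (x : String) : PySem.Dict String Int :=
  d.insert x (d.getD x 0 + 1)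

/-- The count dict A builds for column `v` over the rows of `data`. -/
def pvCol (data : List (List String)) (v : Int) : PySem.Dict String Int :=
  data.foldl (fun d row => pvBump d (PySem.List.pyGetD row v "")) PySem.Dict.empty

-- A's inner-loop body (guarded key init + increment) is exactly pvBump.
lemma pvStepA_eq (var : PySem.Dict String Int) (x : String) :
    (let var' := if var.get? x = none then var.insert x 0 else var
     var'.insert x (var'.getD x 0 + 1)) = pvBump var x := by
  by_cases h : var.get? x = none
  · simp [h, pvBump, PySem.Dict.insert_insert_self, PySem.Dict.getD_eq_get?_getD]
  · simp [h, pvBump]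

lemma pvFoldA_eq (v : Int) : ∀ (l : List (List String)) (acc : PySem.Dict String Int),
    l.foldl (fun var row =>
        let x := PySem.List.pyGetD row v ""
        let var := if var.get? x = none then var.insert x 0 else var
        var.insert x (var.getD x 0 + 1)) acc
      = l.foldl (fun d row => pvBump d (PySem.List.pyGetD row v "")) acc := by
  intro l
  induction l with
  | nil => intro acc; rfl
  | cons r t ih =>
      intro acc
      simpa [pvStepA_eq acc (PySem.List.pyGetD r v "")] using ih _

/-- A's result: the dict built from the (name, column count dict) pairs in column order. -/
lemma pvA_eq (data : List (List String)) (varnames : List String) :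
    collect_counts data varnames
      = (PySem.Dict.ofList ((PySem.List.pyRange 0 (PySem.List.len varnames) 1).map
            (fun v => (PySem.List.pyGetD varnames v "", pvCol data v)))).items.map
          (fun p => (p.1, p.2.items)) := by
  have hinner : ∀ v : Int,
      (PySem.List.pyRange 0 (PySem.List.len data) 1).foldl (fun var c =>
          let x := PySem.List.pyGetD (PySem.List.pyGetD data c []) v ""
          let var := if var.get? x = none then var.insert x 0 else var
          var.insert x (var.getD x 0 + 1)) PySem.Dict.empty = pvCol data v := fun v =>
    (PySem.List.foldl_pyRange_zero_pyGetD data ([] : List String)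
        (fun (var : PySem.Dict String Int) row =>
          let x := PySem.List.pyGetD row v ""
          let var := if var.get? x = none then var.insert x 0 else var
          var.insert x (var.getD x 0 + 1)) PySem.Dict.empty).trans
      (pvFoldA_eq v data PySem.Dict.empty)
  have hA : (PySem.List.pyRange 0 (PySem.List.len varnames) 1).foldl
        (fun (vc : PySem.Dict String (PySem.Dict String Int)) v =>
          vc.insert (PySem.List.pyGetD varnames v "") (pvCol data v)) PySem.Dict.empty
      = PySem.Dict.ofList ((PySem.List.pyRange 0 (PySem.List.len varnames) 1).map
          (fun v => (PySem.List.pyGetD varnames v "", pvCol data v))) := by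
    show _ = ((PySem.List.pyRange 0 (PySem.List.len varnames) 1).map
        (fun v => (PySem.List.pyGetD varnames v "", pvCol data v))).foldl
        (fun (d : PySem.Dict String (PySem.Dict String Int)) p => d.insert p.1 p.2)
        PySem.Dict.empty
    rw [List.foldl_map]
  simp only [collect_counts, hinner, hA]

/-- B's staged dedup+count dict for a column equals A's incrementally built count dict. -/
lemma pvColumnCounts_eq (data : List (List String)) (v : Int) :
    pvColumnCounts (data.map (fun row => PySem.List.pyGetD row v "")) = pvCol data v := by
  set col := data.map (fun row => PySem.List.pyGetD row v "") with hcol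
  have hA : pvCol data v = PySem.Dict.counter col := by
    rw [pvCol, hcol, ← PySem.Dict.foldl_insert_getD_add_one_eq_counter, List.foldl_map]
    rfl
  rw [hA]
  apply PySem.Dict.ext
  have hfresh : ∀ x ∈ (PySem.List.dedup col).map (fun x => (x, (col.count x : Int))),
      (PySem.Dict.empty : PySem.Dict String Int).contains x.1 = false := by
    intro x _; exact PySem.Dict.contains_empty x.1
  have hnodup : (((PySem.List.dedup col).map (fun x => (x, (col.count x : Int)))).map (·.1)).Nodup := by
    rw [List.map_map]
    simp [Function.comp_def]
  have hB : (pvColumnCounts col).items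
      = (PySem.List.dedup col).map (fun x => (x, (col.count x : Int))) := by
    show (((PySem.List.dedup col).map (fun x => (x, (col.count x : Int)))).foldl
        (fun (d : PySem.Dict String Int) p => d.insert p.1 p.2) PySem.Dict.empty).items = _
    rw [PySem.Dict.items_foldl_insert_fresh _ _ _ _ hfresh hnodup]
    simp [Function.comp_def, PySem.Dict.empty]
  rw [hB, PySem.Dict.items_counter, PySem.List.dedup_eq_ofList]

-- ===== VERDICT (by name: the statement is the Claim_ definition above) =====
theorem collect_counts_spec : Claim_equal_collect_counts := by
  intro data varnames _ _
  show collect_counts data varnames = collect_counts_alt data varnames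
  rw [pvA_eq data varnames]
  simp only [collect_counts_alt,
    PySem.List.enumerate_eq_map_pyRange varnames ("" : String), List.map_map]
  simp only [Function.comp_def, pvColumnCounts_eq, PySem.List.len_eq]
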